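-- pv_equiv track=rewrite | github.com/jbmopper/jbmopper.github.io | scripts/inline-notebook-helpers.py | find_helpers_cell
-- ===== SOURCE A (Python) =====
-- def find_helpers_cell(content: str) -> tuple[int, int] | None:
--     """Return (start_index, end_index) of the cell that contains 'from notebook_helpers import', or None."""
--     if "from notebook_helpers import" not in content:
--         return None
--     # Find @app.cell that precedes the line with notebook_helpers
--     lines = content.split("\n")
--     in_cell_start = None
--     for i, line in enumerate(lines):
--         if line.strip().startswith("@app.cell"):
--             in_cell_start = i
--         if in_cell_start is not None and "from notebook_helpers import" in line:
--             # Find end of this cell: next @app.cell or end of file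
--             end = len(lines)
--             for j in range(i + 1, len(lines)):
--                 if lines[j].strip().startswith("@app.cell"):
--                     end = j
--                     break
--             return (in_cell_start, end)
--     return None
-- ===== SOURCE B (Python) =====
-- def find_helpers_cell(content: str) -> tuple[int, int] | None:
--     """Return (start_index, end_index) of the cell that contains 'from notebook_helpers import', or None."""
--     if "from notebook_helpers import" not in content:
--         return None
--     lines = content.split("\n")
--     starts = [i for i, line in enumerate(lines) if line.strip().startswith("@app.cell")]
--     if not starts:
--         return None
--     h = next((i for i, line in enumerate(lines)
--               if i >= starts[0] and "from notebook_helpers import" in line), None)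
--     if h is None:
--         return None
--     start = max(t for t in starts if t <= h)
--     end = next((t for t in starts if t > h), len(lines))
--     return (start, end)
-- ===== Notes on version B (the rewrite author's own statement) =====
-- stated objective: alternative
-- what changed: Replaces A's stateful scan (tracking the last @app.cell seen, with a nested forward scan for the cell end) by an index-based decomposition: precompute the list of cell-start indices once, locate the first qualifying import line, then read the enclosing cell's start and end off that index list with max/next.
import Mathlib
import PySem

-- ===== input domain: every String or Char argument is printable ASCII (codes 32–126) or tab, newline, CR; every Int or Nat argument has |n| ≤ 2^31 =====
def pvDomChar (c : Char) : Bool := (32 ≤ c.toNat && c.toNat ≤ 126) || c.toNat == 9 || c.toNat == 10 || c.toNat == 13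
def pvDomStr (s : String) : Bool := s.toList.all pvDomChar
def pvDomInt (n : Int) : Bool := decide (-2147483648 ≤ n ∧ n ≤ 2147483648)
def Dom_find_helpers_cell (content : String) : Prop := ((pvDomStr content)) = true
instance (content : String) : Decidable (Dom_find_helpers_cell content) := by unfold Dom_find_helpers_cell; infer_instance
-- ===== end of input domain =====

-- B replaces A's stateful line scan by a precomputed list of cell-start indices read off with max/next: an alternative decomposition of the same cost.

-- ===== PORT A =====
-- shared leaf predicates: 'line.strip().startswith("@app.cell")' and '"from notebook_helpers import" in line'
def pvCell (l : String) : Bool := PySem.Str.startswith (PySem.Str.strip l) "@app.cell"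
def pvImp (l : String) : Bool := PySem.Str.isIn "from notebook_helpers import" l

-- inner loop 'for j in range(i+1, len(lines)): if cell-start: end = j; break' (end defaults to len(lines))
def pvFindEnd (rest : List String) (j : Int) (dflt : Int) : Int :=
  match rest with
  | [] => dflt
  | l :: t => if pvCell l then j else pvFindEnd t (j + 1) dflt

-- main loop of A: rest = unread lines, i = current index, ics = in_cell_start
def pvLoopA (rest : List String) (i : Int) (ics : Option Int) (len : Int) : Option (Int × Int) :=
  match rest with
  | [] => none
  | l :: t =>
    let ics' := if pvCell l then some i else ics
    match ics' with
    | some s => if pvImp l then some (s, pvFindEnd t (i + 1) len) else pvLoopA t (i + 1) (some s) len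
    | none => pvLoopA t (i + 1) none len

def find_helpers_cell (content : String) : Option (Int × Int) :=
  if !(PySem.Str.isIn "from notebook_helpers import" content) then none
  else
    let lines := (PySem.Str.split? content "\n").getD []   -- sep = "\n" ≠ "", so split? is always some
    pvLoopA lines 0 none (lines.length : Int)

-- ===== PORT B =====
def find_helpers_cell_alt (content : String) : Option (Int × Int) :=
  if !(PySem.Str.isIn "from notebook_helpers import" content) then none
  else
    let lines := (PySem.Str.split? content "\n").getD []   -- sep = "\n" ≠ "", so split? is always some
    let starts := ((PySem.List.enumerate lines).filter (fun p => pvCell p.2)).map (fun p => p.1)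
    match starts with
    | [] => none
    | s0 :: _ =>
      match (PySem.List.enumerate lines).find? (fun p => decide (s0 ≤ p.1) && pvImp p.2) with
      | none => none
      | some p =>
        let h := p.1
        let start := (PySem.List.max? (starts.filter (fun t => decide (t ≤ h))) (fun x => x)).getD 0
        let e := (starts.find? (fun t => decide (h < t))).getD (lines.length : Int)
        some (start, e)

-- ===== PRECONDITION & SPEC =====
def Spec_find_helpers_cell (content : String) (out : Option (Int × Int)) : Prop := out = find_helpers_cell_alt content
instance (content : String) (out : Option (Int × Int)) : Decidable (Spec_find_helpers_cell content out) := by unfold Spec_find_helpers_cell; infer_instance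

-- ===== CLAIM (what is proved, stated in full; the proofs are below) =====
def Claim_equal_find_helpers_cell : Prop := ∀ (content : String), Dom_find_helpers_cell content → Spec_find_helpers_cell content (find_helpers_cell content)

-- ===== LEMMAS AND PROOFS =====

-- indices (offset n) of the lines satisfying p
def pvIdxs (p : String → Bool) : List String → Int → List Int
  | [], _ => []
  | l :: t, n => if p l then n :: pvIdxs p t (n + 1) else pvIdxs p t (n + 1)

-- split a list at its first line satisfying p
def pvSplit (p : String → Bool) : List String → Option (List String × String × List String)
  | [] => none
  | l :: t => if p l then some ([], l, t) else (pvSplit p t).map (fun w => (l :: w.1, w.2.1, w.2.2))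

theorem pvIdxs_mem (p : String → Bool) : ∀ (rest : List String) (n : Int) (y : Int),
    y ∈ pvIdxs p rest n → n ≤ y ∧ y < n + rest.length := by
  intro rest
  induction rest with
  | nil => intro n y hy; simp [pvIdxs] at hy
  | cons l t ih =>
    intro n y hy
    simp only [pvIdxs] at hy
    by_cases hp : p l = true
    · rw [if_pos hp] at hy
      rcases List.mem_cons.mp hy with h | h
      · subst h; simp only [List.length_cons]; push_cast; omega
      · have := ih (n+1) y h; simp at *; omega
    · rw [if_neg hp] at hy
      have := ih (n+1) y hy; simp at *; omega

theorem pvIdxs_sorted (p : String → Bool) : ∀ (rest : List String) (n : Int),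
    (pvIdxs p rest n).Pairwise (· ≤ ·) := by
  intro rest
  induction rest with
  | nil => intro n; simp [pvIdxs]
  | cons l t ih =>
    intro n
    simp only [pvIdxs]
    split
    · refine List.pairwise_cons.mpr ⟨?_, ih (n+1)⟩
      intro y hy; have := pvIdxs_mem p t (n+1) y hy; omega
    · exact ih (n+1)

theorem pvIdxs_append (p : String → Bool) : ∀ (xs ys : List String) (n : Int),
    pvIdxs p (xs ++ ys) n = pvIdxs p xs n ++ pvIdxs p ys (n + xs.length) := by
  intro xs
  induction xs with
  | nil => intro ys n; simp [pvIdxs]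
  | cons l t ih =>
    intro ys n
    simp only [List.cons_append, pvIdxs]
    rw [ih]
    have h1 : n + 1 + (t.length : Int) = n + (((l :: t).length : Nat) : Int) := by
      push_cast [List.length_cons]; ring
    split <;> simp [h1]

theorem pvIdxs_append_skip (p : String → Bool) : ∀ (u w : List String) (n : Int),
    (∀ x ∈ u, p x = false) → pvIdxs p (u ++ w) n = pvIdxs p w (n + u.length) := by
  intro u
  induction u with
  | nil => intro w n _; simp
  | cons l t ih =>
    intro w n hu
    have hl : p l = false := hu l (by simp)
    simp only [List.cons_append, pvIdxs, hl, Bool.false_eq_true, if_false]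
    rw [ih w (n+1) (fun x hx => hu x (by simp [hx]))]
    congr 1; push_cast [List.length_cons]; ring

theorem pvFindEnd_eq : ∀ (rest : List String) (j d : Int),
    pvFindEnd rest j d = ((pvIdxs pvCell rest j).head?).getD d := by
  intro rest
  induction rest with
  | nil => intro j d; simp [pvFindEnd, pvIdxs]
  | cons l t ih =>
    intro j d
    simp only [pvFindEnd, pvIdxs]
    split <;> simp [ih]

theorem pvSplit_none (p : String → Bool) : ∀ (rest : List String),
    pvSplit p rest = none → ∀ n, pvIdxs p rest n = [] := by
  intro rest
  induction rest with
  | nil => intro _ n; simp [pvIdxs]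
  | cons l t ih =>
    intro hs n
    simp only [pvSplit] at hs
    by_cases hp : p l = true
    · rw [if_pos hp] at hs; exact absurd hs (by simp)
    · rw [if_neg hp] at hs
      simp only [Option.map_eq_none_iff] at hs
      simp only [pvIdxs]
      rw [if_neg hp]
      exact ih hs (n+1)

theorem pvSplit_some (p : String → Bool) : ∀ (rest : List String) (u : List String) (l : String) (t : List String),
    pvSplit p rest = some (u, l, t) → rest = u ++ l :: t ∧ (∀ x ∈ u, p x = false) ∧ p l = true := by
  intro rest
  induction rest with
  | nil => intro u l t hs; simp [pvSplit] at hs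
  | cons a t ih =>
    intro u l r hs
    simp only [pvSplit] at hs
    by_cases hp : p a = true
    · rw [if_pos hp] at hs
      obtain ⟨hu, hl, hr⟩ : [] = u ∧ a = l ∧ t = r := by simpa [Prod.ext_iff] using hs
      subst hu; subst hl; subst hr
      exact ⟨rfl, by simp, hp⟩
    · rw [if_neg hp] at hs
      rcases hmap : pvSplit p t with _ | ⟨u2, l2, r2⟩
      · rw [hmap] at hs; simp at hs
      · rw [hmap] at hs
        obtain ⟨e1, e2, e3⟩ := ih u2 l2 r2 hmap
        obtain ⟨hu, hl, hr⟩ : a :: u2 = u ∧ l2 = l ∧ r2 = r := by simpa [Prod.ext_iff] using hs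
        subst hu; subst hl; subst hr
        refine ⟨by simp [e1], ?_, e3⟩
        intro x hx
        rcases List.mem_cons.mp hx with h | h
        · subst h; simpa using hp
        · exact e2 x h

theorem pvGetLast?_cons_getD (a b : Int) (xs : List Int) :
    ((a :: xs).getLast?).getD b = (xs.getLast?).getD a := by
  induction xs generalizing a with
  | nil => simp
  | cons x xs ih =>
    rw [List.getLast?_cons_cons]
    cases h : (x :: xs).getLast? with
    | none => simp [List.getLast?_eq_none_iff] at h
    | some v => simp

theorem pvFoldlMax_sorted : ∀ (t : List Int) (x : Int), (x :: t).Pairwise (· ≤ ·) →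
    some (t.foldl max x) = (x :: t).getLast? := by
  intro t
  induction t with
  | nil => intro x _; simp
  | cons y t ih =>
    intro x hp
    have hxy : x ≤ y := (List.pairwise_cons.mp hp).1 y (by simp)
    have hp' : (y :: t).Pairwise (· ≤ ·) := (List.pairwise_cons.mp hp).2
    rw [List.getLast?_cons_cons, List.foldl_cons, max_eq_right hxy]
    exact ih y hp'

theorem pvMax?_sorted (X : List Int) (h : X.Pairwise (· ≤ ·)) :
    PySem.List.max? X (fun x => x) = X.getLast? := by
  cases X with
  | nil => rfl
  | cons x t =>
    rw [PySem.List.max?_id_cons]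
    exact pvFoldlMax_sorted t x h

theorem pvEnum_cons (l : String) (t : List String) (n : Int) :
    PySem.List.enumerate (l :: t) n = (n, l) :: PySem.List.enumerate t (n + 1) := by
  rfl

theorem pvEnum_starts : ∀ (lines : List String) (n : Int),
    ((PySem.List.enumerate lines n).filter (fun p => pvCell p.2)).map (fun p => p.1) = pvIdxs pvCell lines n := by
  intro lines
  induction lines with
  | nil => intro n; rfl
  | cons l t ih =>
    intro n
    rw [pvEnum_cons]
    simp only [List.filter_cons, pvIdxs]
    by_cases hc : pvCell l = true
    · simp [hc, ih]
    · simp only [hc, Bool.false_eq_true, if_false]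
      exact ih (n+1)

theorem pvEnum_append : ∀ (xs ys : List String) (n : Int),
    PySem.List.enumerate (xs ++ ys) n = PySem.List.enumerate xs n ++ PySem.List.enumerate ys (n + xs.length) := by
  intro xs
  induction xs with
  | nil => intro ys n; simp [PySem.List.enumerate]
  | cons l t ih =>
    intro ys n
    rw [List.cons_append, pvEnum_cons, pvEnum_cons, ih]
    have h1 : n + 1 + (t.length : Int) = n + (((l :: t).length : Nat) : Int) := by
      push_cast [List.length_cons]; ring
    simp [h1]

theorem pvEnum_find_low (s0 : Int) : ∀ (xs : List String) (n : Int), n + xs.length ≤ s0 →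
    (PySem.List.enumerate xs n).find? (fun p => decide (s0 ≤ p.1) && pvImp p.2) = none := by
  intro xs
  induction xs with
  | nil => intro n _; rfl
  | cons l t ih =>
    intro n hle
    rw [pvEnum_cons]
    rw [List.find?_cons_of_neg]
    · exact ih (n+1) (by simp only [List.length_cons] at hle; push_cast at hle ⊢; omega)
    · simp only [List.length_cons] at hle
      have : ¬ (s0 ≤ n) := by push_cast at hle; omega
      simp [this]

theorem pvEnum_find_high (s0 : Int) : ∀ (rest : List String) (n : Int), s0 ≤ n →
    (PySem.List.enumerate rest n).find? (fun p => decide (s0 ≤ p.1) && pvImp p.2) =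
      (match pvSplit pvImp rest with
       | none => none
       | some (u, l, _) => some (n + u.length, l)) := by
  intro rest
  induction rest with
  | nil => intro n _; rfl
  | cons l t ih =>
    intro n hs
    rw [pvEnum_cons]
    by_cases hq : pvImp l = true
    · rw [List.find?_cons_of_pos (by simp [hq, hs])]
      simp [pvSplit, hq]
    · rw [List.find?_cons_of_neg (by simp [hq])]
      rw [ih (n+1) (by omega)]
      simp only [pvSplit]
      rw [if_neg hq]
      rcases hm : pvSplit pvImp t with _ | ⟨u, x, r⟩
      · rfl
      · simp only [Option.map_some]
        have : n + 1 + (u.length : Int) = n + (((l :: u).length : Nat) : Int) := by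
          push_cast [List.length_cons]; ring
        simp [this]

theorem pvLoopA_some : ∀ (rest : List String) (n s d : Int),
    pvLoopA rest n (some s) d =
      (match pvSplit pvImp rest with
       | none => none
       | some (u, l, t) =>
          some (((pvIdxs pvCell (u ++ [l]) n).getLast?).getD s, pvFindEnd t (n + u.length + 1) d)) := by
  intro rest
  induction rest with
  | nil => intro n s d; rfl
  | cons l t ih =>
    intro n s d
    by_cases hq : pvImp l = true
    · simp only [pvSplit, hq, if_true, pvLoopA]
      by_cases hc : pvCell l = true
      · simp [hc, pvIdxs]
      · simp [hc, pvIdxs]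
    · simp only [pvSplit, hq, Bool.false_eq_true, if_false, pvLoopA]
      by_cases hc : pvCell l = true
      · simp only [hc, if_true]
        rw [ih]
        rcases hm : pvSplit pvImp t with _ | ⟨u, x, r⟩
        · rfl
        · simp only [Option.map_some]
          have harr : n + 1 + (u.length : Int) + 1 = n + (((l :: u).length : Nat) : Int) + 1 := by
            push_cast [List.length_cons]; ring
          have hidx : pvIdxs pvCell ((l :: u) ++ [x]) n = n :: pvIdxs pvCell (u ++ [x]) (n + 1) := by
            simp [pvIdxs, hc]
          rw [hidx, pvGetLast?_cons_getD, harr]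
      · simp only [hc, Bool.false_eq_true, if_false]
        rw [ih]
        rcases hm : pvSplit pvImp t with _ | ⟨u, x, r⟩
        · rfl
        · simp only [Option.map_some]
          have harr : n + 1 + (u.length : Int) + 1 = n + (((l :: u).length : Nat) : Int) + 1 := by
            push_cast [List.length_cons]; ring
          have hidx : pvIdxs pvCell ((l :: u) ++ [x]) n = pvIdxs pvCell (u ++ [x]) (n + 1) := by
            simp [pvIdxs, hc]
          rw [hidx, harr]

theorem pvLoopA_none : ∀ (rest : List String) (n d : Int),
    pvLoopA rest n none d =
      (match pvSplit pvCell rest with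
       | none => none
       | some (u, l, t) => pvLoopA (l :: t) (n + u.length) none d) := by
  intro rest
  induction rest with
  | nil => intro n d; rfl
  | cons l t ih =>
    intro n d
    by_cases hc : pvCell l = true
    · simp only [pvSplit, hc, if_true]
      simp
    · simp only [pvSplit, hc, Bool.false_eq_true, if_false]
      have hstep : pvLoopA (l :: t) n none d = pvLoopA t (n + 1) none d := by
        simp [pvLoopA, hc]
      rw [hstep, ih (n+1)]
      rcases hm : pvSplit pvCell t with _ | ⟨u, x, r⟩
      · rfl
      · simp only [Option.map_some]
        have harr : n + 1 + (u.length : Int) = n + (((l :: u).length : Nat) : Int) := by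
          push_cast [List.length_cons]; ring
        rw [harr]

theorem pvLoopA_enter (l : String) (t : List String) (n d : Int) (h : pvCell l = true) :
    pvLoopA (l :: t) n none d = pvLoopA (l :: t) n (some n) d := by
  simp [pvLoopA, h]

theorem pvCore_eq (lines : List String) :
    pvLoopA lines 0 none (lines.length : Int) =
      (let starts := ((PySem.List.enumerate lines).filter (fun p => pvCell p.2)).map (fun p => p.1)
       match starts with
       | [] => none
       | s0 :: _ =>
         match (PySem.List.enumerate lines).find? (fun p => decide (s0 ≤ p.1) && pvImp p.2) with
         | none => none
         | some p =>
           let h := p.1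
           let start := (PySem.List.max? (starts.filter (fun t => decide (t ≤ h))) (fun x => x)).getD 0
           let e := (starts.find? (fun t => decide (h < t))).getD (lines.length : Int)
           some (start, e)) := by
  rcases hsp : pvSplit pvCell lines with _ | ⟨u, l, t⟩
  · have h0 := pvSplit_none pvCell lines hsp 0
    rw [pvLoopA_none, hsp]
    simp only [pvEnum_starts, h0]
  · obtain ⟨hdec, hu, hl⟩ := pvSplit_some pvCell lines u l t hsp
    have hstarts : ((PySem.List.enumerate lines).filter (fun p => pvCell p.2)).map (fun p => p.1)
        = (u.length : Int) :: pvIdxs pvCell t ((u.length : Int) + 1) := by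
      rw [pvEnum_starts, hdec, pvIdxs_append_skip pvCell u _ 0 hu]
      norm_num
      simp [pvIdxs, hl]
    have hLHS : pvLoopA lines 0 none (lines.length : Int)
        = pvLoopA (l :: t) (u.length : Int) (some (u.length : Int)) (lines.length : Int) := by
      rw [pvLoopA_none, hsp]
      show pvLoopA (l :: t) (0 + (u.length : Int)) none (lines.length : Int) = _
      rw [show (0 : Int) + (u.length : Int) = (u.length : Int) by ring,
          pvLoopA_enter l t _ _ hl]
    rw [hLHS, pvLoopA_some, hstarts]
    show _ = (match (PySem.List.enumerate lines).find?
          (fun p => decide ((u.length : Int) ≤ p.1) && pvImp p.2) with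
       | none => none
       | some p =>
         some ((PySem.List.max?
                  (((u.length : Int) :: pvIdxs pvCell t ((u.length : Int) + 1)).filter
                    (fun v => decide (v ≤ p.1))) (fun x => x)).getD 0,
               ((((u.length : Int) :: pvIdxs pvCell t ((u.length : Int) + 1)).find?
                  (fun v => decide (p.1 < v))).getD (lines.length : Int))))
    rcases hsq : pvSplit pvImp (l :: t) with _ | ⟨u2, ql, t2⟩
    · have hfind : (PySem.List.enumerate lines).find?
            (fun p => decide ((u.length : Int) ≤ p.1) && pvImp p.2) = none := by
        rw [hdec, pvEnum_append, List.find?_append,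
            pvEnum_find_low (u.length : Int) u 0 (by norm_num), Option.none_or,
            pvEnum_find_high (u.length : Int) (l :: t) _ (by norm_num), hsq]
      rw [hfind]
    · obtain ⟨hdec2, hu2, hql⟩ := pvSplit_some pvImp (l :: t) u2 ql t2 hsq
      set s0 : Int := (u.length : Int) with hs0
      set h : Int := s0 + (u2.length : Int) with hh
      have hfind : (PySem.List.enumerate lines).find?
            (fun p => decide (s0 ≤ p.1) && pvImp p.2) = some (h, ql) := by
        rw [hdec, pvEnum_append, List.find?_append,
            pvEnum_find_low s0 u 0 (by rw [hs0]; omega), Option.none_or,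
            pvEnum_find_high s0 (l :: t) _ (by rw [hs0]; omega), hsq]
        show some (0 + s0 + (u2.length : Int), ql) = _
        rw [show (0 : Int) + s0 + (u2.length : Int) = h by rw [hh]; ring]
      rw [hfind]
      set X : List Int := pvIdxs pvCell (u2 ++ [ql]) s0 with hX
      set Y : List Int := pvIdxs pvCell t2 (h + 1) with hY
      have hrg : l :: t = (u2 ++ [ql]) ++ t2 := by simpa using hdec2
      have hXY : ((u.length : Int) :: pvIdxs pvCell t ((u.length : Int) + 1))
          = X ++ Y := by
        rw [show ((u.length : Int) :: pvIdxs pvCell t ((u.length : Int) + 1))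
              = pvIdxs pvCell (l :: t) s0 by simp [pvIdxs, hl, hs0]]
        rw [hrg, pvIdxs_append]
        congr 2
        rw [hh]; push_cast [List.length_append, List.length_singleton]; omega
      have hXb : ∀ y ∈ X, s0 ≤ y ∧ y ≤ h := by
        intro y hy
        have := pvIdxs_mem pvCell (u2 ++ [ql]) s0 y hy
        rw [hh]
        push_cast [List.length_append, List.length_singleton] at this
        omega
      have hYb : ∀ y ∈ Y, h + 1 ≤ y := by
        intro y hy
        exact (pvIdxs_mem pvCell t2 (h + 1) y hy).1
      obtain ⟨c, w, hcw⟩ : ∃ c w, u2 ++ [ql] = c :: w := by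
        cases hu2' : u2 with
        | nil => exact ⟨ql, [], by simp⟩
        | cons a b => exact ⟨a, b ++ [ql], by simp⟩
      have hcl : c = l := by
        have h2 := hrg
        rw [hcw] at h2
        simp only [List.cons_append] at h2
        exact (List.cons_eq_cons.mp h2).1.symm
      obtain ⟨X', hX'⟩ : ∃ X', X = s0 :: X' := by
        rw [hX, hcw, hcl]
        refine ⟨pvIdxs pvCell w (s0 + 1), ?_⟩
        simp [pvIdxs, hl]
      have hfil : (X ++ Y).filter (fun v => decide (v ≤ h)) = X := by
        rw [List.filter_append,
            List.filter_eq_self.mpr (by intro a ha; simpa using (hXb a ha).2),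
            List.filter_eq_nil_iff.mpr (by intro a ha; simp only [decide_eq_true_eq]; have := hYb a ha; omega)]
        simp
      have hfind2 : (X ++ Y).find? (fun v => decide (h < v)) = Y.head? := by
        rw [List.find?_append,
            List.find?_eq_none.mpr (by intro a ha; simp only [decide_eq_true_eq]; have := (hXb a ha).2; omega),
            Option.none_or]
        cases hYc : Y with
        | nil => rfl
        | cons y ys =>
          rw [List.find?_cons_of_pos (by simp only [decide_eq_true_eq]; have := hYb y (by rw [hYc]; simp); omega)]
          rfl
      rw [hXY]
      show some ((X.getLast?).getD s0, pvFindEnd t2 (s0 + (u2.length : Int) + 1) (lines.length : Int))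
          = some ((PySem.List.max? ((X ++ Y).filter (fun v => decide (v ≤ h))) (fun x => x)).getD 0,
                  (((X ++ Y).find? (fun v => decide (h < v))).getD (lines.length : Int)))
      rw [hfil, hfind2,
          pvMax?_sorted X ((pvIdxs_sorted pvCell (u2 ++ [ql]) s0).imp (by intro a b hab; omega)),
          pvFindEnd_eq, show s0 + (u2.length : Int) + 1 = h + 1 by rw [hh], ← hY, hX',
          pvGetLast?_cons_getD, pvGetLast?_cons_getD]

-- ===== VERDICT (by name: the statement is the Claim_ definition above) =====
theorem find_helpers_cell_spec : Claim_equal_find_helpers_cell := by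
  intro content _
  unfold Spec_find_helpers_cell find_helpers_cell find_helpers_cell_alt
  cases hg : PySem.Str.isIn "from notebook_helpers import" content with
  | false => simp
  | true => exact pvCore_eq ((PySem.Str.split? content "\n").getD [])
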